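-- pv_equiv track=rewrite | github.com/sergio-alv-per/advent-of-code-2023 | 18/problem1.py | digging_plan_size_and_starting_position
-- ===== SOURCE A (Python) =====
-- def digging_plan_size_and_starting_position(digging_plan):
--     current_position = (0, 0)
--     max_i = max_j= 0
--     min_i = min_j = 0
--
--     for direction, length, _ in digging_plan:
--         if direction == "U":
--             current_position = (current_position[0] - length, current_position[1])
--         elif direction == "D":
--             current_position = (current_position[0] + length, current_position[1])
--         elif direction == "L":
--             current_position = (current_position[0], current_position[1] - length)
--         elif direction == "R":
--             current_position = (current_position[0], current_position[1] + length)
--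
--         max_i = max(max_i, current_position[0])
--         max_j = max(max_j, current_position[1])
--
--         min_i = min(min_i, current_position[0])
--         min_j = min(min_j, current_position[1])
--
--     return (max_i - min_i + 1, max_j - min_j + 1), (-min_i, -min_j)
-- ===== SOURCE B (Python) =====
-- def digging_plan_size_and_starting_position(digging_plan):
--     deltas = {"U": (-1, 0), "D": (1, 0), "L": (0, -1), "R": (0, 1)}
--     coords = [(0, 0)]
--     prev = (0, 0)
--     for direction, length, _ in digging_plan:
--         di, dj = deltas.get(direction, (0, 0))
--         prev = (prev[0] + di * length, prev[1] + dj * length)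
--         coords.append(prev)
--     is_coords = [i for i, _ in coords]
--     js_coords = [j for _, j in coords]
--     max_i, min_i = max(is_coords), min(is_coords)
--     max_j, min_j = max(js_coords), min(js_coords)
--     return (max_i - min_i + 1, max_j - min_j + 1), (-min_i, -min_j)
-- ===== Notes on version B (the rewrite author's own statement) =====
-- stated objective: alternative
-- what changed: B first materialises the full list of cumulative coordinates via a delta table, then finds the extremes with separate max/min reducing passes over the coordinate components, instead of A's single loop tracking four running extremes alongside the position.
import Mathlib
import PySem

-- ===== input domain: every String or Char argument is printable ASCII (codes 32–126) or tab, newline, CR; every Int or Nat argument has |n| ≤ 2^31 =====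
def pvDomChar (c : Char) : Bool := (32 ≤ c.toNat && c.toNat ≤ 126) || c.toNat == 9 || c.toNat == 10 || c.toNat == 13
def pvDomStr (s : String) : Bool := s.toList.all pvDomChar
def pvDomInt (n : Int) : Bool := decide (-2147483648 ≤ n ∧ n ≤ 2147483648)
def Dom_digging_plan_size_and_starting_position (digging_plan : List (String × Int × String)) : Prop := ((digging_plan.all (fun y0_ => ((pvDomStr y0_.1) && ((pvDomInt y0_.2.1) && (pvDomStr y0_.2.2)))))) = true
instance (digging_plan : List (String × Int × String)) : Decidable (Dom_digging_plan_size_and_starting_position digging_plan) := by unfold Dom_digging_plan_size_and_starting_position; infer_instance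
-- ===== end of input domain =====

-- B builds the full list of cumulative coordinates via a delta table and takes max/min over its
-- components in separate passes, instead of A's online tracking of four running extremes (alternative, same cost).


-- ===== PORT A =====
def pvAStep (cur : Int × Int) (mv : String × Int × String) : Int × Int :=
  if mv.1 == "U" then (cur.1 - mv.2.1, cur.2)
  else if mv.1 == "D" then (cur.1 + mv.2.1, cur.2)
  else if mv.1 == "L" then (cur.1, cur.2 - mv.2.1)
  else if mv.1 == "R" then (cur.1, cur.2 + mv.2.1)
  else cur

def pvALoop : List (String × Int × String) → (Int × Int) → Int → Int → Int → Int → (Int × Int) × (Int × Int)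
  | [], _, max_i, max_j, min_i, min_j => ((max_i - min_i + 1, max_j - min_j + 1), (-min_i, -min_j))
  | mv :: rest, cur, max_i, max_j, min_i, min_j =>
      let cur' := pvAStep cur mv
      pvALoop rest cur' (max max_i cur'.1) (max max_j cur'.2) (min min_i cur'.1) (min min_j cur'.2)

def digging_plan_size_and_starting_position (digging_plan : List (String × Int × String)) : (Int × Int) × (Int × Int) :=
  pvALoop digging_plan (0, 0) 0 0 0 0

-- ===== PORT B =====
def pvDeltas : PySem.Dict String (Int × Int) :=
  PySem.Dict.ofList [("U", (-1, 0)), ("D", (1, 0)), ("L", (0, -1)), ("R", (0, 1))]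

def digging_plan_size_and_starting_position_alt (digging_plan : List (String × Int × String)) : (Int × Int) × (Int × Int) :=
  let st := digging_plan.foldl
    (fun (s : List (Int × Int) × (Int × Int)) mv =>
      let d := pvDeltas.getD mv.1 (0, 0)
      let p := (s.2.1 + d.1 * mv.2.1, s.2.2 + d.2 * mv.2.1)
      (s.1 ++ [p], p))
    ([(0, 0)], (0, 0))
  let is_coords := st.1.map (·.1)
  let js_coords := st.1.map (·.2)
  -- coords always contains (0,0), so max?/min? are 'some'; the .getD default is never used
  let max_i := (PySem.List.max? is_coords (fun y => y)).getD 0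
  let min_i := (PySem.List.min? is_coords (fun y => y)).getD 0
  let max_j := (PySem.List.max? js_coords (fun y => y)).getD 0
  let min_j := (PySem.List.min? js_coords (fun y => y)).getD 0
  ((max_i - min_i + 1, max_j - min_j + 1), (-min_i, -min_j))

-- ===== PRECONDITION & SPEC =====
def Spec_digging_plan_size_and_starting_position (digging_plan : List (String × Int × String)) (out : (Int × Int) × (Int × Int)) : Prop := out = digging_plan_size_and_starting_position_alt digging_plan
instance (digging_plan : List (String × Int × String)) (out : (Int × Int) × (Int × Int)) : Decidable (Spec_digging_plan_size_and_starting_position digging_plan out) := by unfold Spec_digging_plan_size_and_starting_position; infer_instance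

-- ===== CLAIM (what is proved, stated in full; the proofs are below) =====
def Claim_equal_digging_plan_size_and_starting_position : Prop := ∀ (digging_plan : List (String × Int × String)), Dom_digging_plan_size_and_starting_position digging_plan → Spec_digging_plan_size_and_starting_position digging_plan (digging_plan_size_and_starting_position digging_plan)

-- ===== LEMMAS AND PROOFS =====

-- B's per-move position update
def pvBStep (p : Int × Int) (mv : String × Int × String) : Int × Int :=
  let d := pvDeltas.getD mv.1 (0, 0)
  (p.1 + d.1 * mv.2.1, p.2 + d.2 * mv.2.1)

-- positions visited after the start, in order
def pvTraj : (Int × Int) → List (String × Int × String) → List (Int × Int)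
  | _, [] => []
  | p, mv :: rest => pvBStep p mv :: pvTraj (pvBStep p mv) rest

theorem pvStep_eq (p : Int × Int) (mv : String × Int × String) : pvAStep p mv = pvBStep p mv := by
  obtain ⟨d, len, c⟩ := mv
  have hmk : pvDeltas = PySem.Dict.mk [("U", (-1, 0)), ("D", (1, 0)), ("L", (0, -1)), ("R", (0, 1))] := by rfl
  by_cases h1 : d = "U"
  · subst h1; simp [pvAStep, pvBStep, hmk, PySem.Dict.getD_eq_get?_getD, PySem.Dict.get?_mk_cons]; ring
  by_cases h2 : d = "D"
  · subst h2; simp [pvAStep, pvBStep, hmk, PySem.Dict.getD_eq_get?_getD, PySem.Dict.get?_mk_cons]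
  by_cases h3 : d = "L"
  · subst h3; simp [pvAStep, pvBStep, hmk, PySem.Dict.getD_eq_get?_getD, PySem.Dict.get?_mk_cons]; ring
  by_cases h4 : d = "R"
  · subst h4; simp [pvAStep, pvBStep, hmk, PySem.Dict.getD_eq_get?_getD, PySem.Dict.get?_mk_cons]
  · simp [pvAStep, pvBStep, hmk, PySem.Dict.getD_eq_get?_getD, 
      Ne.symm h1, Ne.symm h2, Ne.symm h3, Ne.symm h4, h1, h2, h3, h4, PySem.Dict.get?]

theorem pvBfold (l : List (String × Int × String)) (acc : List (Int × Int)) (p : Int × Int) :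
    l.foldl (fun (s : List (Int × Int) × (Int × Int)) mv =>
      (s.1 ++ [(s.2.1 + (pvDeltas.getD mv.1 (0, 0)).1 * mv.2.1, s.2.2 + (pvDeltas.getD mv.1 (0, 0)).2 * mv.2.1)],
       (s.2.1 + (pvDeltas.getD mv.1 (0, 0)).1 * mv.2.1, s.2.2 + (pvDeltas.getD mv.1 (0, 0)).2 * mv.2.1))) (acc, p)
    = (acc ++ pvTraj p l, (p :: pvTraj p l).getLast (by simp)) := by
  induction l generalizing acc p with
  | nil => simp [pvTraj]
  | cons mv rest ih =>
      simp only [List.foldl_cons, pvTraj]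
      rw [ih]
      simp [pvBStep, List.append_assoc]

theorem pvALoop_eq (l : List (String × Int × String)) (p : Int × Int) (Mi Mj mi mj : Int) :
    pvALoop l p Mi Mj mi mj =
      ((((pvTraj p l).map (·.1)).foldl max Mi - ((pvTraj p l).map (·.1)).foldl min mi + 1,
        ((pvTraj p l).map (·.2)).foldl max Mj - ((pvTraj p l).map (·.2)).foldl min mj + 1),
       (-((pvTraj p l).map (·.1)).foldl min mi, -((pvTraj p l).map (·.2)).foldl min mj)) := by
  induction l generalizing p Mi Mj mi mj with
  | nil => simp [pvALoop, pvTraj]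
  | cons mv rest ih =>
      simp only [pvALoop, pvTraj, List.map_cons, List.foldl_cons]
      rw [pvStep_eq, ih]

theorem digging_plan_size_and_starting_position_spec : Claim_equal_digging_plan_size_and_starting_position := by
  intro dp _
  unfold Spec_digging_plan_size_and_starting_position
  unfold digging_plan_size_and_starting_position digging_plan_size_and_starting_position_alt
  rw [pvALoop_eq]
  have hb := pvBfold dp [(0, 0)] (0, 0)
  simp only [List.singleton_append] at hb
  rw [hb]
  simp [PySem.List.max?_id_cons, PySem.List.min?_id_cons]
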